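-- pv_equiv track=rewrite | github.com/konatduti/Contra | ocr_processor.py | map_ocr_lang_to_vision_hints
-- ===== SOURCE A (Python) =====
-- VISION_LANGUAGE_HINTS = {
--     'hun': 'hu',
--     'eng': 'en',
--     'deu': 'de',
--     'fra': 'fr',
--     'spa': 'es',
--     'ita': 'it',
-- }
--
-- def map_ocr_lang_to_vision_hints(lang):
--     if not lang:
--         return ['hu', 'en']
--
--     tokens = [token.strip().lower() for token in lang.replace(',', '+').split('+') if token.strip()]
--     hints = []
--     for token in tokens:
--         mapped = VISION_LANGUAGE_HINTS.get(token)
--         if not mapped and len(token) == 2: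
--             mapped = token
--         if mapped and mapped not in hints:
--             hints.append(mapped)
--
--     if not hints:
--         return ['hu', 'en']
--     return hints
-- ===== SOURCE B (Python) =====
-- VISION_LANGUAGE_HINTS = {
--     'hun': 'hu',
--     'eng': 'en',
--     'deu': 'de',
--     'fra': 'fr',
--     'spa': 'es',
--     'ita': 'it',
-- }
--
-- def map_ocr_lang_to_vision_hints(lang):
--     if not lang:
--         return ['hu', 'en']
--     hints = []
--     seen = set()
--     token = []  # chars of the current token: lowered, leading ws skipped, interior gaps kept
--     gap = []    # pending whitespace run inside the current token
--     for c in lang + '+':  # sentinel delimiter flushes the last token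
--         if c in ',+':
--             t = ''.join(token)
--             hint = VISION_LANGUAGE_HINTS.get(t) or (t if len(t) == 2 else '')
--             if hint and hint not in seen:
--                 seen.add(hint)
--                 hints.append(hint)
--             token = []
--             gap = []
--         elif c.isspace():
--             if token:
--                 gap.append(c)
--         else:
--             token += gap
--             token.append(c.lower())
--             gap = []
--     return hints or ['hu', 'en']
-- ===== Notes on version B (the rewrite author's own statement) =====
-- stated objective: alternative
-- what changed: Replaces A's staged library pipeline (replace commas, split on '+', strip/lower each token, then a dedup loop over the token list) by a single character-level scanner: one pass over the string with a token/gap state machine that tokenizes, strips, lowers and emits deduplicated hints on the fly via a seen-set, never materialising the token list.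
import Mathlib
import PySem

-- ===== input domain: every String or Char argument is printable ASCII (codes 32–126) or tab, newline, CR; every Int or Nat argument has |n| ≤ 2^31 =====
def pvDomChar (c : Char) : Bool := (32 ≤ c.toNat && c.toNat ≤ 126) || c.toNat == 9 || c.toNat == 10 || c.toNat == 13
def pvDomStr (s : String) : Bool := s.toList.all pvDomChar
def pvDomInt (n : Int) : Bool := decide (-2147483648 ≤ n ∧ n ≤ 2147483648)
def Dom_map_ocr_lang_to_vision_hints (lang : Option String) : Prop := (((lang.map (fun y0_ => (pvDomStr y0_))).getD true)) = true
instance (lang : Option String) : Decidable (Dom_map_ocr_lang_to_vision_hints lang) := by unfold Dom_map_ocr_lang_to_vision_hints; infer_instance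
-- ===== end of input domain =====

-- B replaces A's staged pipeline (replace / split / strip / lower / dedup loop) by a single
-- character-level scanner with a token/gap state machine and a seen-set; objective: alternative.

-- module-level constant shared by both versions
def VISION_LANGUAGE_HINTS : PySem.Dict String String :=
  PySem.Dict.ofList [("hun", "hu"), ("eng", "en"), ("deu", "de"), ("fra", "fr"), ("spa", "es"), ("ita", "it")]

-- ===== PORT A =====
def map_ocr_lang_to_vision_hints (lang : Option String) : List String :=
  match lang with
  | none => ["hu", "en"]
  | some s =>
    if s = "" then ["hu", "en"]
    else
      let tokens := ((PySem.Str.split? (PySem.Str.replace s "," "+") "+").getD []).filterMap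
        (fun token => if PySem.Str.strip token ≠ "" then some (PySem.Str.lower (PySem.Str.strip token)) else none)
      let hints := tokens.foldl (fun hints token =>
        let mapped : Option String := VISION_LANGUAGE_HINTS.get? token
        let mapped := if (mapped.getD "").isEmpty && (PySem.Str.len token == 2) then some token else mapped
        if !(mapped.getD "").isEmpty && !(hints.contains (mapped.getD "")) then hints ++ [mapped.getD ""] else hints) []
      if hints = [] then ["hu", "en"] else hints

-- ===== PORT B =====
-- B's per-character scanner step: state = (hints, seen, token, gap)
def bStep : (List String × List String × List Char × List Char) → Char →
    (List String × List String × List Char × List Char)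
  | (hints, seen, token, gap), c =>
    if c = ',' ∨ c = '+' then
      let t := String.ofList token
      let g := (VISION_LANGUAGE_HINTS.get? t).getD ""
      let hint := if g ≠ "" then g else if PySem.Str.len t == 2 then t else ""
      if hint ≠ "" ∧ hint ∉ seen then (hints ++ [hint], PySem.Set.add seen hint, [], [])
      else (hints, seen, [], [])
    else if PySem.Chars.isspace c then
      if token ≠ [] then (hints, seen, token, gap ++ [c]) else (hints, seen, token, gap)
    else (hints, seen, token ++ gap ++ [PySem.Chars.lowerChar c], [])

def map_ocr_lang_to_vision_hints_alt (lang : Option String) : List String :=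
  match lang with
  | none => ["hu", "en"]
  | some s =>
    if s = "" then ["hu", "en"]
    else
      -- for c in lang + '+': the scanner runs over the characters with a sentinel delimiter
      let st := (s.toList ++ ['+']).foldl bStep ([], [], [], [])
      let hints := st.1
      if hints = [] then ["hu", "en"] else hints

-- ===== PRECONDITION & SPEC =====
def Spec_map_ocr_lang_to_vision_hints (lang : Option String) (out : List String) : Prop := out = map_ocr_lang_to_vision_hints_alt lang
instance (lang : Option String) (out : List String) : Decidable (Spec_map_ocr_lang_to_vision_hints lang out) := by unfold Spec_map_ocr_lang_to_vision_hints; infer_instance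

-- ===== CLAIM =====
def Claim_equal_map_ocr_lang_to_vision_hints : Prop := ∀ (lang : Option String), Dom_map_ocr_lang_to_vision_hints lang → Spec_map_ocr_lang_to_vision_hints lang (map_ocr_lang_to_vision_hints lang)

-- ===== LEMMAS AND PROOFS =====

-- the per-token emission (B's flush, also the body of A's loop after translation to char lists)
def pvEmit (h : List String) (tok : List Char) : List String :=
  let t := String.ofList tok
  let g := (VISION_LANGUAGE_HINTS.get? t).getD ""
  let hint := if g ≠ "" then g else if PySem.Str.len t == 2 then t else ""
  if hint ≠ "" ∧ hint ∉ h then h ++ [hint] else h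

def pvDelim (c : Char) : Bool := c = ',' || c = '+'
def pvRepl (c : Char) : Char := if c = ',' then '+' else c

-- splitting the ORIGINAL chars on ',' / '+' (what replace-then-split amounts to)
def pvSplitD : List Char → List (List Char)
  | [] => [[]]
  | c :: cs => if pvDelim c then [] :: pvSplitD cs else (pvSplitD cs).modifyHead (c :: ·)

-- token accumulated by the scanner over one delimiter-free piece
def pvTokAcc : List Char → List Char → List Char → List Char
  | tok, _, [] => tok
  | tok, gap, c :: p =>
    if PySem.Chars.isspace c then
      (if tok ≠ [] then pvTokAcc tok (gap ++ [c]) p else pvTokAcc tok gap p)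
    else pvTokAcc (tok ++ gap ++ [PySem.Chars.lowerChar c]) [] p

-- token list produced by the scanner over the whole input
def pvToks : List Char → List Char → List Char → List (List Char)
  | tok, _, [] => [tok]
  | tok, gap, c :: cs =>
    if pvDelim c then tok :: pvToks [] [] cs
    else if PySem.Chars.isspace c then
      (if tok ≠ [] then pvToks tok (gap ++ [c]) cs else pvToks tok gap cs)
    else pvToks (tok ++ gap ++ [PySem.Chars.lowerChar c]) [] cs

-- the scanner's hint list, recursively
def pvF : List String → List Char → List Char → List Char → List String
  | h, tok, _, [] => pvEmit h tok
  | h, tok, gap, c :: cs =>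
    if pvDelim c then pvF (pvEmit h tok) [] [] cs
    else if PySem.Chars.isspace c then
      (if tok ≠ [] then pvF h tok (gap ++ [c]) cs else pvF h tok gap cs)
    else pvF h (tok ++ gap ++ [PySem.Chars.lowerChar c]) [] cs


theorem pvSplitD_ne_nil (cs : List Char) : pvSplitD cs ≠ [] := by
  cases cs with
  | nil => simp [pvSplitD]
  | cons c cs =>
    simp only [pvSplitD]
    split
    · simp
    · cases h : pvSplitD cs with
      | nil => exact absurd h (pvSplitD_ne_nil cs)
      | cons p ps => simp

theorem pvSet_add_notmem (h : List String) (x : String) (hx : x ∉ h) :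
    PySem.Set.add h x = h ++ [x] := by
  simp [PySem.Set.add, hx]

-- B's flush step on a delimiter is pvEmit twice (given seen = hints)
theorem bStep_delim (h : List String) (tok gap : List Char) (c : Char) (hc : c = ',' ∨ c = '+') :
    bStep (h, h, tok, gap) c = (pvEmit h tok, pvEmit h tok, [], []) := by
  have key : ∀ (hint : String),
      (if hint ≠ "" ∧ hint ∉ h then (h ++ [hint], PySem.Set.add h hint, ([] : List Char), ([] : List Char))
       else (h, h, [], []))
      = ((if hint ≠ "" ∧ hint ∉ h then h ++ [hint] else h),
         (if hint ≠ "" ∧ hint ∉ h then h ++ [hint] else h), [], []) := by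
    intro hint
    split_ifs with hg
    · simp [pvSet_add_notmem h hint hg.2]
    · rfl
  simp only [bStep, pvEmit, if_pos hc]
  exact key _

-- (1) the B fold equals pvF (invariant: seen = hints)
theorem foldB_eq_pvF (cs : List Char) : ∀ (h : List String) (tok gap : List Char),
    (cs ++ ['+']).foldl bStep (h, h, tok, gap) = (pvF h tok gap cs, pvF h tok gap cs, [], []) := by
  induction cs with
  | nil =>
    intro h tok gap
    simp only [List.nil_append, List.foldl_cons, List.foldl_nil, pvF]
    rw [bStep_delim h tok gap '+' (Or.inr rfl)]
  | cons c cs ih =>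
    intro h tok gap
    simp only [List.cons_append, List.foldl_cons]
    by_cases hd : c = ',' ∨ c = '+'
    · have hdb : pvDelim c = true := by rcases hd with h1 | h1 <;> simp [pvDelim, h1]
      rw [bStep_delim h tok gap c hd, ih]
      simp [pvF, hdb]
    · have hdb : pvDelim c = false := by
        simp only [pvDelim, Bool.or_eq_false_iff, decide_eq_false_iff_not]
        exact ⟨fun h1 => hd (Or.inl h1), fun h1 => hd (Or.inr h1)⟩
      by_cases hs : PySem.Chars.isspace c = true
      · by_cases ht : tok = []
        · have : bStep (h, h, tok, gap) c = (h, h, tok, gap) := by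
            simp [bStep, hd, hs, ht]
          rw [this, ih]
          simp [pvF, hdb, hs, ht]
        · have : bStep (h, h, tok, gap) c = (h, h, tok, gap ++ [c]) := by
            simp [bStep, hd, hs, ht]
          rw [this, ih]
          simp [pvF, hdb, hs, ht]
      · have : bStep (h, h, tok, gap) c = (h, h, tok ++ gap ++ [PySem.Chars.lowerChar c], []) := by
          simp [bStep, hd, hs]
        rw [this, ih]
        simp [pvF, hdb, hs]

-- (2) pvF is the fold of pvEmit over the scanner's tokens
theorem pvF_eq_foldl (cs : List Char) : ∀ (h : List String) (tok gap : List Char),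
    pvF h tok gap cs = (pvToks tok gap cs).foldl pvEmit h := by
  induction cs with
  | nil => intro h tok gap; simp [pvF, pvToks]
  | cons c cs ih =>
    intro h tok gap
    simp only [pvF, pvToks]
    split_ifs <;> simp [ih]

-- (3) the scanner's tokens are pvTokAcc over the split pieces
theorem pvToks_eq_split (cs : List Char) : ∀ (tok gap : List Char),
    pvToks tok gap cs =
      pvTokAcc tok gap (pvSplitD cs).headI :: ((pvSplitD cs).tail).map (pvTokAcc [] []) := by
  induction cs with
  | nil => intro tok gap; simp [pvToks, pvSplitD, pvTokAcc]
  | cons c cs ih =>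
    intro tok gap
    obtain ⟨p, ps, hsp⟩ : ∃ p ps, pvSplitD cs = p :: ps := by
      cases h : pvSplitD cs with
      | nil => exact absurd h (pvSplitD_ne_nil cs)
      | cons p ps => exact ⟨p, ps, rfl⟩
    by_cases hd : pvDelim c = true
    · simp only [pvToks, pvSplitD, hd, if_true, ih, hsp]
      simp [pvTokAcc]
    · simp only [pvToks, pvSplitD, hd, Bool.false_eq_true, if_false, hsp, List.modifyHead_cons,
        List.headI_cons, List.tail_cons]
      rw [show pvTokAcc tok gap (c :: p) =
          (if PySem.Chars.isspace c then
            (if tok ≠ [] then pvTokAcc tok (gap ++ [c]) p else pvTokAcc tok gap p)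
          else pvTokAcc (tok ++ gap ++ [PySem.Chars.lowerChar c]) [] p) from rfl]
      split_ifs <;> rw [ih] <;> simp [hsp]

-- strip/rstrip helpers
theorem strip_cons_space (c : Char) (p : List Char) (hc : PySem.Chars.isspace c = true) :
    PySem.Chars.strip (c :: p) = PySem.Chars.strip p := by
  simp [PySem.Chars.strip, PySem.Chars.lstrip, List.dropWhile_cons, hc]

theorem strip_cons_nonspace (c : Char) (p : List Char) (hc : PySem.Chars.isspace c = false) :
    PySem.Chars.strip (c :: p) = PySem.Chars.rstrip (c :: p) := by
  simp [PySem.Chars.strip, PySem.Chars.lstrip, List.dropWhile_cons, hc]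

theorem rstrip_cons_any (c : Char) (p : List Char)
    (hp : p.any (fun x => !PySem.Chars.isspace x) = true) :
    PySem.Chars.rstrip (c :: p) = c :: PySem.Chars.rstrip p := by
  have h1 : (List.dropWhile PySem.Chars.isspace p.reverse).isEmpty = false := by
    simp only [List.isEmpty_eq_false_iff, ne_eq, List.dropWhile_eq_nil_iff]
    simp only [List.any_eq_true, Bool.not_eq_eq_eq_not, Bool.not_true] at hp
    obtain ⟨x, hx, hxs⟩ := hp
    intro hall
    have := hall x (List.mem_reverse.mpr hx)
    rw [hxs] at this
    exact Bool.false_ne_true this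
  simp [PySem.Chars.rstrip, List.dropWhile_append, h1]

theorem rstrip_cons_all (c : Char) (p : List Char)
    (hp : p.any (fun x => !PySem.Chars.isspace x) = false) (hc : PySem.Chars.isspace c = false) :
    PySem.Chars.rstrip (c :: p) = [c] := by
  have h1 : List.dropWhile PySem.Chars.isspace p.reverse = [] := by
    rw [List.dropWhile_eq_nil_iff]
    intro x hx
    simp only [List.any_eq_false, Bool.not_eq_eq_eq_not, Bool.not_true] at hp
    simpa using hp x (List.mem_reverse.mp hx)
  simp [PySem.Chars.rstrip, List.dropWhile_append, h1, List.dropWhile_cons, hc]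

theorem lowerChar_space (c : Char) (hc : PySem.Chars.isspace c = true) :
    PySem.Chars.lowerChar c = c := by
  have hn : c.toNat = 32 ∨ (9 ≤ c.toNat ∧ c.toNat ≤ 13) ∨ (28 ≤ c.toNat ∧ c.toNat ≤ 31) ∨
      c.toNat = 133 ∨ c.toNat = 160 ∨ c.toNat = 5760 ∨ (8192 ≤ c.toNat ∧ c.toNat ≤ 8202) ∨
      c.toNat = 8232 ∨ c.toNat = 8233 ∨ c.toNat = 8239 ∨ c.toNat = 8287 ∨ c.toNat = 12288 := by
    simp [PySem.Chars.isspace] at hc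
    tauto
  have hup : PySem.Chars.isupper c = false := by
    simp only [PySem.Chars.isupper, Bool.and_eq_false_iff, decide_eq_false_iff_not, Char.not_le]
    rcases Nat.lt_or_ge c.toNat 65 with h1 | h1
    · left
      exact Char.lt_def.mpr (by simpa using h1)
    · right
      have h2 : 90 < c.toNat := by omega
      exact Char.lt_def.mpr (by simpa using h2)
  simp [PySem.Chars.lowerChar, hup]

-- (4) pvTokAcc from the empty state is strip-then-lower
theorem pvTokAcc_spec (p : List Char) : ∀ (tok gap : List Char), (tok = [] → gap = []) →
    pvTokAcc tok gap p =
      if tok = [] then (PySem.Chars.strip p).map PySem.Chars.lowerChar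
      else if p.any (fun c => !PySem.Chars.isspace c) then
        tok ++ gap ++ (PySem.Chars.rstrip p).map PySem.Chars.lowerChar
      else tok := by
  induction p with
  | nil =>
    intro tok gap hinv
    by_cases ht : tok = []
    · simp [pvTokAcc, ht, PySem.Chars.strip, PySem.Chars.lstrip, PySem.Chars.rstrip]
    · simp [pvTokAcc, ht]
  | cons c p ihp =>
    intro tok gap hinv
    by_cases hc : PySem.Chars.isspace c = true
    · by_cases ht : tok = []
      · have hg : gap = [] := hinv ht
        subst ht; subst hg
        simp only [pvTokAcc, hc, if_true, ne_eq, not_true_eq_false, if_false, reduceIte]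
        rw [ihp [] [] (fun _ => rfl)]
        simp [strip_cons_space c p hc]
      · simp only [pvTokAcc, hc, if_true, ne_eq, ht, not_false_eq_true, reduceIte]
        rw [ihp tok (gap ++ [c]) (fun h => absurd h ht)]
        simp only [ht, reduceIte]
        by_cases hany : p.any (fun x => !PySem.Chars.isspace x) = true
        · have hall : (c :: p).any (fun x => !PySem.Chars.isspace x) = true := by
            simp [List.any_cons, hany]
          rw [hany, hall]
          simp only [if_true]
          rw [rstrip_cons_any c p hany]
          simp [lowerChar_space c hc]
        · have hall : (c :: p).any (fun x => !PySem.Chars.isspace x) = false := by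
            simp only [List.any_cons, Bool.or_eq_false_iff]
            exact ⟨by simp [hc], by simpa using hany⟩
          rw [Bool.not_eq_true] at hany
          rw [hany, hall]
          simp
    · rw [Bool.not_eq_true] at hc
      have step : pvTokAcc tok gap (c :: p) =
          pvTokAcc (tok ++ gap ++ [PySem.Chars.lowerChar c]) [] p := by
        simp [pvTokAcc, hc]
      rw [step, ihp (tok ++ gap ++ [PySem.Chars.lowerChar c]) [] (by simp)]
      have hne : tok ++ gap ++ [PySem.Chars.lowerChar c] ≠ [] := by simp
      simp only [hne, reduceIte]
      have hall : (c :: p).any (fun x => !PySem.Chars.isspace x) = true := by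
        simp [List.any_cons, hc]
      by_cases ht : tok = []
      · have hg : gap = [] := hinv ht
        subst ht; subst hg
        simp only [if_true, List.nil_append]
        rw [strip_cons_nonspace c p hc]
        by_cases hany : p.any (fun x => !PySem.Chars.isspace x) = true
        · rw [hany, rstrip_cons_any c p hany]
          simp
        · rw [Bool.not_eq_true] at hany
          rw [hany, rstrip_cons_all c p hany hc]
          simp
      · simp only [ht, reduceIte, hall, if_true]
        by_cases hany : p.any (fun x => !PySem.Chars.isspace x) = true
        · rw [hany, rstrip_cons_any c p hany]
          simp
        · rw [Bool.not_eq_true] at hany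
          rw [hany, rstrip_cons_all c p hany hc]
          simp

-- replace with a single-char pattern is a map
theorem replace_go_spec (fuel : Nat) : ∀ (l acc : List Char), l.length ≤ fuel →
    PySem.Chars.replace.go [','] ['+'] fuel l acc = acc.reverse ++ l.map pvRepl := by
  induction fuel with
  | zero =>
    intro l acc hl
    have : l = [] := by
      cases l with
      | nil => rfl
      | cons a t => simp at hl
    subst this
    simp [PySem.Chars.replace.go]
  | succ n ih =>
    intro l acc hl
    cases l with
    | nil => simp [PySem.Chars.replace.go]
    | cons c t =>
      by_cases hc : c = ','
      · subst hc
        have step : PySem.Chars.replace.go [','] ['+'] (n+1) (',' :: t) acc =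
            PySem.Chars.replace.go [','] ['+'] n t ('+' :: acc) := by
          simp [PySem.Chars.replace.go, List.isPrefixOf]
        rw [step, ih t _ (by simpa using Nat.le_of_succ_le_succ hl)]
        simp [pvRepl]
      · have step : PySem.Chars.replace.go [','] ['+'] (n+1) (c :: t) acc =
            PySem.Chars.replace.go [','] ['+'] n t (c :: acc) := by
          simp [PySem.Chars.replace.go, List.isPrefixOf, Ne.symm hc]
        rw [step, ih t _ (by simpa using Nat.le_of_succ_le_succ hl)]
        simp [pvRepl, hc]

theorem replace_spec (cs : List Char) :
    PySem.Chars.replace cs [','] ['+'] = cs.map pvRepl := by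
  simp only [PySem.Chars.replace, List.isEmpty_cons, reduceIte]
  simpa using replace_go_spec cs.length cs [] le_rfl

theorem modifyHead_fun_id (X : List (List Char)) :
    X.modifyHead (fun x => x) = X := by
  cases X <;> rfl

theorem splitOn_go_spec (fuel : Nat) : ∀ (l cur : List Char) (accs : List (List Char)),
    l.length ≤ fuel →
    PySem.Chars.splitOn.go ['+'] fuel (l.map pvRepl) cur accs
      = accs.reverse ++ (pvSplitD l).modifyHead (cur.reverse ++ ·) := by
  induction fuel with
  | zero =>
    intro l cur accs hl
    have : l = [] := by
      cases l with
      | nil => rfl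
      | cons a t => simp at hl
    subst this
    simp [PySem.Chars.splitOn.go, pvSplitD]
  | succ n ih =>
    intro l cur accs hl
    cases l with
    | nil => simp [PySem.Chars.splitOn.go, pvSplitD]
    | cons c t =>
      by_cases hd : pvDelim c = true
      · have hrc : pvRepl c = '+' := by
          rcases (by simpa [pvDelim] using hd : c = ',' ∨ c = '+') with h1 | h1 <;> simp [pvRepl, h1]
      -- delimiter: the go step starts a new piece
        have step : PySem.Chars.splitOn.go ['+'] (n+1) ((c :: t).map pvRepl) cur accs =
            PySem.Chars.splitOn.go ['+'] n (t.map pvRepl) [] (cur.reverse :: accs) := by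
          simp [PySem.Chars.splitOn.go, List.isPrefixOf, hrc]
        rw [step, ih t [] _ (by simpa using Nat.le_of_succ_le_succ hl)]
        simp [pvSplitD, hd, modifyHead_fun_id]
      · have hrc : pvRepl c = c := by
          have : c ≠ ',' := by
            intro h1; rw [h1] at hd; simp [pvDelim] at hd
          simp [pvRepl, this]
        have hcp : c ≠ '+' := by
          intro h1; rw [h1] at hd; simp [pvDelim] at hd
        have step : PySem.Chars.splitOn.go ['+'] (n+1) ((c :: t).map pvRepl) cur accs =
            PySem.Chars.splitOn.go ['+'] n (t.map pvRepl) (c :: cur) accs := by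
          simp [PySem.Chars.splitOn.go, List.isPrefixOf, hrc, Ne.symm hcp]
        rw [step, ih t _ _ (by simpa using Nat.le_of_succ_le_succ hl)]
        obtain ⟨p, ps, hsp⟩ : ∃ p ps, pvSplitD t = p :: ps := by
          cases h : pvSplitD t with
          | nil => exact absurd h (pvSplitD_ne_nil t)
          | cons p ps => exact ⟨p, ps, rfl⟩
        simp [pvSplitD, hd, hsp, hrc]

-- (5) A's replace-then-split equals pvSplitD
theorem split_repl (cs : List Char) :
    PySem.Chars.splitOn (PySem.Chars.replace cs [','] ['+']) ['+'] = pvSplitD cs := by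
  rw [replace_spec]
  simp only [PySem.Chars.splitOn, List.length_map]
  rw [splitOn_go_spec (cs.length + 1) cs [] [] (Nat.le_succ _)]
  simp [modifyHead_fun_id]

-- A's loop body on a token string is pvEmit on its chars
theorem bodyA_eq_emit (h : List String) (t : String) :
    (let mapped : Option String := VISION_LANGUAGE_HINTS.get? t
     let mapped := if (mapped.getD "").isEmpty && (PySem.Str.len t == 2) then some t else mapped
     if !(mapped.getD "").isEmpty && !(h.contains (mapped.getD "")) then h ++ [mapped.getD ""] else h)
    = pvEmit h t.toList := by
  simp only [pvEmit, String.ofList_toList]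
  have hlen : PySem.Str.len t = (t.length : Int) := by simp [PySem.Str.len]
  by_cases h2 : (t.length : Int) = 2
  · have ht : t ≠ "" := by
      intro e; subst e; simp at h2
    have hte : t.isEmpty = false := Bool.eq_false_iff.mpr (fun hb => ht (String.isEmpty_iff.mp hb))
    have hemp : ("" : String).isEmpty = true := rfl
    cases hg : VISION_LANGUAGE_HINTS.get? t with
    | none =>
      simp only [hg, Option.getD_none, Option.getD_some, hemp, hlen, h2,
        beq_self_eq_true, Bool.true_and, Bool.and_eq_true, reduceIte, hte,
        Bool.not_eq_eq_eq_not, Bool.not_false, Bool.not_true, List.contains_eq_mem,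
        decide_eq_false_iff_not, ne_eq, ht, not_false_eq_true, true_and, if_true]
      by_cases hm : t ∈ h <;> simp [hm, hte, ht]
    | some v =>
      by_cases hv : v = ""
      · subst hv
        simp only [hg, Option.getD_some, hemp, hlen, h2, beq_self_eq_true,
          Bool.true_and, reduceIte, hte, Bool.and_eq_true, Bool.not_eq_eq_eq_not, Bool.not_false,
          Bool.not_true, List.contains_eq_mem, decide_eq_false_iff_not, ne_eq, ht,
          not_false_eq_true, true_and, if_true]
        by_cases hm : t ∈ h <;> simp [hm, hte, ht]
      · have hve : v.isEmpty = false := Bool.eq_false_iff.mpr (fun hb => hv (String.isEmpty_iff.mp hb))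
        simp only [hg, Option.getD_some, hve, Bool.false_and, reduceIte, Bool.not_false,
          Bool.true_and, Bool.and_eq_true, Bool.not_eq_eq_eq_not, Bool.not_true,
          List.contains_eq_mem, decide_eq_false_iff_not, ne_eq, hv, not_false_eq_true, true_and]
        by_cases hm : v ∈ h <;> simp [hm, hve, hv]
  · have h2' : ((t.length : Int) == 2) = false := by simpa using h2
    cases hg : VISION_LANGUAGE_HINTS.get? t with
    | none =>
      simp [hg, hlen, h2', String.isEmpty_iff]
    | some v =>
      by_cases hv : v = ""
      · subst hv
        simp [hg, hlen, h2', String.isEmpty_iff]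
      · have hve : v.isEmpty = false := Bool.eq_false_iff.mpr (fun hb => hv (String.isEmpty_iff.mp hb))
        simp only [hg, Option.getD_some, hve, Bool.false_and, reduceIte, Bool.not_false,
          Bool.true_and, Bool.and_eq_true, Bool.not_eq_eq_eq_not, Bool.not_true,
          List.contains_eq_mem, decide_eq_false_iff_not, ne_eq, hv, not_false_eq_true, true_and]
        by_cases hm : v ∈ h <;> simp [hm, hve, hv]

theorem pvEmit_nil (h : List String) : pvEmit h [] = h := by
  have h1 : (VISION_LANGUAGE_HINTS.get? (String.ofList [])).getD "" = "" := by decide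
  have h2 : (PySem.Str.len (String.ofList []) == 2) = false := by decide
  simp [pvEmit, h1, h2]

-- (6) A's filtered token fold equals the pvEmit fold over all pieces
theorem foldA_eq_emit (pieces : List (List Char)) : ∀ (h : List String),
    (pieces.filterMap (fun p => if PySem.Chars.strip p ≠ [] then
        some (String.ofList ((PySem.Chars.strip p).map PySem.Chars.lowerChar)) else none)).foldl
      (fun hints token =>
        let mapped : Option String := VISION_LANGUAGE_HINTS.get? token
        let mapped := if (mapped.getD "").isEmpty && (PySem.Str.len token == 2) then some token else mapped
        if !(mapped.getD "").isEmpty && !(hints.contains (mapped.getD "")) then hints ++ [mapped.getD ""] else hints) h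
    = (pieces.map (fun p => (PySem.Chars.strip p).map PySem.Chars.lowerChar)).foldl pvEmit h := by
  induction pieces with
  | nil => intro h; rfl
  | cons p ps ih =>
    intro h
    by_cases hp : PySem.Chars.strip p = []
    · simp only [List.filterMap_cons, hp, ne_eq, not_true_eq_false, reduceIte, List.map_cons,
        List.foldl_cons]
      rw [ih]
      simp [hp, pvEmit_nil]
    · simp only [List.filterMap_cons, ne_eq, hp, not_false_eq_true, reduceIte, List.map_cons,
        List.foldl_cons]
      rw [ih]
      congr 1
      rw [bodyA_eq_emit]
      simp

-- ===== VERDICT =====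
theorem map_ocr_lang_to_vision_hints_spec : Claim_equal_map_ocr_lang_to_vision_hints := by
  intro lang _
  unfold Spec_map_ocr_lang_to_vision_hints map_ocr_lang_to_vision_hints map_ocr_lang_to_vision_hints_alt
  cases lang with
  | none => rfl
  | some s =>
    by_cases hs : s = ""
    · simp [hs]
    · simp only [hs, reduceIte, if_false]
      -- A's token list, moved to char level
      have htoks : ((PySem.Str.split? (PySem.Str.replace s "," "+") "+").getD []).filterMap
          (fun token => if PySem.Str.strip token ≠ "" then some (PySem.Str.lower (PySem.Str.strip token)) else none)
          = (pvSplitD s.toList).filterMap (fun p => if PySem.Chars.strip p ≠ [] then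
              some (String.ofList ((PySem.Chars.strip p).map PySem.Chars.lowerChar)) else none) := by
        have hrep : (PySem.Str.replace s "," "+").toList = PySem.Chars.replace s.toList [','] ['+'] := by
          simpa using PySem.Str.toList_replace s "," "+"
        have hsplit : (PySem.Str.split? (PySem.Str.replace s "," "+") "+").getD []
            = (pvSplitD s.toList).map String.ofList := by
          simp only [PySem.Str.split?, PySem.Chars.split?]
          simp [hrep, split_repl]
        rw [hsplit, List.filterMap_map]
        apply List.filterMap_congr
        intro p _
        have h1 : PySem.Str.strip (String.ofList p) = String.ofList (PySem.Chars.strip p) := by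
          simp [PySem.Str.strip]
        by_cases hp : PySem.Chars.strip p = []
        · have hA : PySem.Str.strip (String.ofList p) = "" := by rw [h1, hp]
          simp [Function.comp, hA, hp]
        · have hA : PySem.Str.strip (String.ofList p) ≠ "" := by
            rw [h1]
            intro he
            exact hp (by simpa using congrArg String.toList he)
          simp only [Function.comp, ne_eq, hA, hp, not_false_iff, if_true, reduceIte]
          apply congrArg
          apply String.toList_inj.mp
          simp [PySem.Str.toList_lower, h1, PySem.Chars.lower]
      rw [htoks, foldA_eq_emit]
      -- B's scanner, moved to the same fold
      rw [foldB_eq_pvF s.toList [] [] []]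
      simp only
      rw [pvF_eq_foldl, pvToks_eq_split]
      obtain ⟨p, ps, hsp⟩ : ∃ p ps, pvSplitD s.toList = p :: ps := by
        cases h : pvSplitD s.toList with
        | nil => exact absurd h (pvSplitD_ne_nil s.toList)
        | cons p ps => exact ⟨p, ps, rfl⟩
      have hacc : ∀ q : List Char, pvTokAcc [] [] q = (PySem.Chars.strip q).map PySem.Chars.lowerChar := by
        intro q
        rw [pvTokAcc_spec q [] [] (fun _ => rfl)]
        simp
      rw [hsp]
      simp only [List.headI_cons, List.tail_cons, List.map_cons, List.foldl_cons, hacc]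
      have : ps.map (pvTokAcc [] []) = ps.map (fun p => (PySem.Chars.strip p).map PySem.Chars.lowerChar) := by
        apply List.map_congr_left
        intro q _
        exact hacc q
      rw [this]
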